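-- pv_equiv track=rewrite | github.com/prashusat/Sentiment-Analysis | machinelearning.py | vectorizer
-- ===== SOURCE A (Python) =====
-- def vectorizer(data_vector,learned_words):
--     vectorized_matrix=[]
--     for line in data_vector:
--         temp=[0 for i in range(len(learned_words))]
--         for word in line.split(" "):
--             if word in learned_words:
--                 index_of_word=learned_words.index(word)
--                 temp[index_of_word]+=1
--             else:
--                 continue
--         vectorized_matrix.append(temp)
--     return vectorized_matrix
-- ===== SOURCE B (Python) =====
-- def vectorizer(data_vector, learned_words):
--     # Build a word -> column map once, then for each line aggregate token
--     # counts and scatter them into the row (one dict lookup per distinct token).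
--     index = {}
--     for i, word in enumerate(learned_words):
--         index.setdefault(word, i)
--     matrix = []
--     for line in data_vector:
--         counts = {}
--         for word in line.split(" "):
--             counts[word] = counts.get(word, 0) + 1
--         row = [0] * len(learned_words)
--         for word, count in counts.items():
--             col = index.get(word)
--             if col is not None:
--                 row[col] = count
--         matrix.append(row)
--     return matrix
-- ===== Notes on version B (the rewrite author's own statement) =====
-- stated objective: alternative
-- what changed: A scans the vocabulary list for every token (membership test plus list.index); B precomputes a word-to-column dict once and, per line, aggregates token counts in a dict and scatters each distinct token's count into the row with one lookup.
import Mathlib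
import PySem

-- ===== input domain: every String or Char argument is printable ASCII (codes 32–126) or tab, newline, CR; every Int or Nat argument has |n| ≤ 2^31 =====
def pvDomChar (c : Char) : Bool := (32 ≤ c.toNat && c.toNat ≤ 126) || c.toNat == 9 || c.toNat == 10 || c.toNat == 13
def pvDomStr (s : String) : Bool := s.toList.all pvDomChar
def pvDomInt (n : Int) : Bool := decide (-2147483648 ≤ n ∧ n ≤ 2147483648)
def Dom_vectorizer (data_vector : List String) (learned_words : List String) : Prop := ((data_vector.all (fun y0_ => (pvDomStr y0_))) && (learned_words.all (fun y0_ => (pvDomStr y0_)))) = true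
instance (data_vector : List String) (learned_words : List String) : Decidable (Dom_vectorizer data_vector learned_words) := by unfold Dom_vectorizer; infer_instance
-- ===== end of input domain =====

-- B builds a word→column map once and, per line, aggregates token counts in a
-- dict before scattering them into the row, replacing A's per-token vocabulary
-- scan (objective: alternative).

-- ===== PORT A =====
def vectorizer (data_vector : List String) (learned_words : List String) : List (List Int) :=
  data_vector.foldl (fun vectorized_matrix line =>
    let temp : List Int := (PySem.List.pyRange 0 (learned_words.length : Int) 1).map (fun _ => 0)
    let temp := ((PySem.Str.split? line " ").getD []).foldl (fun t word =>
      if word ∈ learned_words then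
        match PySem.List.index? learned_words word with
        | some index_of_word => t.set index_of_word (t.getD index_of_word 0 + 1)  -- temp[index_of_word] += 1 (index from list.index, always in range)
        | none => t
      else t) temp
    vectorized_matrix ++ [temp]) []

-- ===== PORT B =====
def vectorizer_alt (data_vector : List String) (learned_words : List String) : List (List Int) :=
  let index : PySem.Dict String Int :=
    (PySem.List.enumerate learned_words 0).foldl
      (fun d iw => d.setdefault iw.2 iw.1) PySem.Dict.empty
  data_vector.foldl (fun matrix line =>
    let counts : PySem.Dict String Int :=
      ((PySem.Str.split? line " ").getD []).foldl
        (fun d word => d.insert word (d.getD word 0 + 1)) PySem.Dict.empty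
    let row : List Int := List.replicate learned_words.length 0
    let row := counts.items.foldl (fun r wc =>
      match index.get? wc.1 with
      | some col => r.set col.toNat wc.2  -- row[col] = count (col from enumerate, 0 ≤ col < len)
      | none => r) row
    matrix ++ [row]) []

-- ===== PRECONDITION & SPEC =====
def Spec_vectorizer (data_vector : List String) (learned_words : List String) (out : List (List Int)) : Prop := out = vectorizer_alt data_vector learned_words
instance (data_vector : List String) (learned_words : List String) (out : List (List Int)) : Decidable (Spec_vectorizer data_vector learned_words out) := by unfold Spec_vectorizer; infer_instance

-- ===== CLAIM (what is proved, stated in full; the proofs are below) =====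
def Claim_equal_vectorizer : Prop := ∀ (data_vector : List String) (learned_words : List String), Dom_vectorizer data_vector learned_words → Spec_vectorizer data_vector learned_words (vectorizer data_vector learned_words)

-- ===== LEMMAS AND PROOFS =====

-- A's inner token loop, named for the proofs (definitionally A's step).
def stepA (lw : List String) (t : List Int) (word : String) : List Int :=
  if word ∈ lw then
    match PySem.List.index? lw word with
    | some i => t.set i (t.getD i 0 + 1)
    | none => t
  else t

lemma length_stepA (lw : List String) (t : List Int) (w : String) :
    (stepA lw t w).length = t.length := by
  unfold stepA
  split_ifs with h
  · cases hix : PySem.List.index? lw w <;> simp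
  · rfl

lemma length_foldA (lw : List String) (ws : List String) (t : List Int) :
    (ws.foldl (stepA lw) t).length = t.length := by
  induction ws generalizing t with
  | nil => rfl
  | cons w rest ih => simp [List.foldl_cons, ih, length_stepA]

-- token count contributing to position i of A's row
def cntA (lw : List String) (ws : List String) (i : Nat) : Nat :=
  ws.countP (fun w => PySem.List.index? lw w == some i)

lemma foldA_getD (lw : List String) (ws : List String) (t : List Int)
    (ht : t.length = lw.length) (i : Nat) (hi : i < t.length) :
    (ws.foldl (stepA lw) t).getD i 0 = t.getD i 0 + (cntA lw ws i : Int) := by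
  induction ws generalizing t with
  | nil => simp [cntA]
  | cons w rest ih =>
    by_cases hm : w ∈ lw
    · obtain ⟨k, hk⟩ := Option.isSome_iff_exists.mp
        ((PySem.List.index?_isSome_iff (xs := lw) (v := w)).mpr hm)
      obtain ⟨hklt, _, _⟩ := PySem.List.getElem_of_index?_eq_some hk
      have hset : stepA lw t w = t.set k (t.getD k 0 + 1) := by
        unfold stepA; rw [if_pos hm, hk]
      have hklen : k < t.length := ht ▸ hklt
      have hlen' : (t.set k (t.getD k 0 + 1)).length = lw.length := by simp [ht]
      rw [List.foldl_cons, hset, ih _ hlen' (by simpa using hi)]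
      have hcnt : cntA lw (w :: rest) i
          = (if k = i then 1 else 0) + cntA lw rest i := by
        rw [PySem.List.index?_eq_idxOf?] at hk
        simp only [cntA, List.countP_cons, PySem.List.index?_eq_idxOf?, hk]
        by_cases hki : k = i
        · simp [hki]; omega
        · simp [hki]
      rw [hcnt]
      by_cases hki : k = i
      · subst hki
        have hset' : (t.set k (t.getD k 0 + 1)).getD k 0 = t.getD k 0 + 1 := by
          rw [List.getD_eq_getElem _ 0 (by simpa using hklen), List.getElem_set_self (by simpa using hklen)]
        rw [hset']
        push_cast; simp; ring
      · have hset' : (t.set k (t.getD k 0 + 1)).getD i 0 = t.getD i 0 := by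
          rw [List.getD_eq_getElem _ 0 (by simpa using hi), List.getElem_set_ne hki,
              List.getD_eq_getElem t 0 hi]
        rw [hset']
        simp [hki]
    · have hnone : PySem.List.index? lw w = none :=
        (PySem.List.index?_eq_none_iff _ _).mpr hm
      have hstep : stepA lw t w = t := by unfold stepA; rw [if_neg hm]
      rw [PySem.List.index?_eq_idxOf?] at hnone
      have hcnt : cntA lw (w :: rest) i = cntA lw rest i := by
        simp [cntA, PySem.List.index?_eq_idxOf?, hnone]
      rw [List.foldl_cons, hstep, ih t ht hi, hcnt]

-- the common row value at column j: the token count of lw[j] if j is the first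
-- occurrence of lw[j] in lw, else 0
def colVal (lw ws : List String) (j : Nat) (hj : j < lw.length) : Int :=
  if PySem.List.index? lw lw[j] = some j then (PySem.List.count ws lw[j] : Int) else 0

lemma cntA_eq_colVal (lw ws : List String) (j : Nat) (hj : j < lw.length) :
    (cntA lw ws j : Int) = colVal lw ws j hj := by
  unfold colVal
  by_cases hfirst : PySem.List.index? lw lw[j] = some j
  · rw [if_pos hfirst]
    have hpred : (fun w => PySem.List.index? lw w == some j) = (fun w => w == lw[j]) := by
      funext w
      by_cases hw : w = lw[j]
      · rw [hw]
        rw [PySem.List.index?_eq_idxOf?] at hfirst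
        simp [hfirst]
      · have hne : PySem.List.index? lw w ≠ some j := by
          intro h
          obtain ⟨hlt, hval, _⟩ := PySem.List.getElem_of_index?_eq_some h
          exact hw hval.symm
        rw [PySem.List.index?_eq_idxOf?] at hne
        simp [hw, hne]
    unfold cntA
    rw [hpred, PySem.List.count_eq]
    simp [List.count]
  · rw [if_neg hfirst]
    have hz : cntA lw ws j = 0 := by
      apply List.countP_eq_zero.mpr
      intro w _
      simp only [beq_iff_eq]
      intro hix
      obtain ⟨hlt, hval, _⟩ := PySem.List.getElem_of_index?_eq_some hix
      exact hfirst (hval ▸ hix)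
    simp [hz]

-- B's index dict looks up the first index in lw (as an Int)
def buildIndex (lw : List String) : PySem.Dict String Int :=
  (PySem.List.enumerate lw 0).foldl (fun d iw => d.setdefault iw.2 iw.1) PySem.Dict.empty

lemma buildIndex_get?_aux (xs : List String) (s : Int) (d : PySem.Dict String Int) (w : String) :
    ((PySem.List.enumerate xs s).foldl (fun d iw => d.setdefault iw.2 iw.1) d).get? w
      = if d.contains w then d.get? w
        else Option.map (fun k : Nat => s + (k : Int)) (PySem.List.index? xs w) := by
  induction xs generalizing s d with
  | nil =>
    simp only [PySem.List.enumerate_nil, List.foldl_nil, PySem.List.index?_eq_idxOf?,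
      List.idxOf?_nil, Option.map_none]
    split_ifs with h
    · rfl
    · exact (PySem.Dict.get?_eq_none_iff_contains d w).mpr (by simp [h])
  | cons x xs ih =>
    rw [PySem.List.enumerate_cons, List.foldl_cons]
    dsimp only
    rw [ih]
    by_cases hc : d.contains x = true
    · rw [PySem.Dict.setdefault_of_contains d s hc]
      by_cases hw : d.contains w = true
      · simp [hw]
      · have hwx : w ≠ x := fun h => hw (h ▸ hc)
        rw [if_neg (by simp [hw]), if_neg (by simp [hw])]
        rw [PySem.List.index?_cons_of_ne xs (Ne.symm hwx)]
        cases hix : PySem.List.index? xs w with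
        | none => simp
        | some k =>
          simp only [Option.map_some]
          push_cast
          congr 1
          ring
    · rw [PySem.Dict.setdefault_of_not_contains d s (by simp [hc])]
      by_cases hw : d.contains w = true
      · have hwx : w ≠ x := fun h => hc (h ▸ hw)
        have hcw : (d.insert x s).contains w = true := by
          rw [PySem.Dict.contains_insert]; simp [hw]
        rw [if_pos hcw, if_pos hw, PySem.Dict.get?_insert_of_ne d s hwx]
      · by_cases hwx : w = x
        · subst hwx
          rw [if_pos (PySem.Dict.contains_insert_self d w s),
              PySem.Dict.get?_insert_self, if_neg (by simp [hw]),
              PySem.List.index?_cons_self]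
          simp
        · have hcw : (d.insert x s).contains w = false := by
            rw [PySem.Dict.contains_insert]; simp [hw, hwx]
          rw [if_neg (by simp [hcw]), if_neg (by simp [hw]),
              PySem.List.index?_cons_of_ne xs (Ne.symm hwx)]
          cases hix : PySem.List.index? xs w with
          | none => simp
          | some k =>
            simp only [Option.map_some]
            push_cast
            congr 1
            ring

lemma buildIndex_get? (lw : List String) (w : String) :
    (buildIndex lw).get? w = Option.map (fun k : Nat => (k : Int)) (PySem.List.index? lw w) := by
  unfold buildIndex
  rw [buildIndex_get?_aux]
  simp [PySem.Dict.contains_empty]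

-- B's scatter loop, named (definitionally B's step)
def stepB (idx : PySem.Dict String Int) (r : List Int) (wc : String × Int) : List Int :=
  match idx.get? wc.1 with
  | some col => r.set col.toNat wc.2
  | none => r

lemma scatter_getD (lw : List String) (L : List (String × Int)) (r : List Int)
    (hr : r.length = lw.length) (hnd : (L.map (·.1)).Nodup) (j : Nat) (hj : j < r.length) :
    (L.foldl (stepB (buildIndex lw)) r).getD j 0
      = match L.find? (fun wc => PySem.List.index? lw wc.1 == some j) with
        | some wc => wc.2
        | none => r.getD j 0 := by
  induction L generalizing r with
  | nil => simp
  | cons wc rest ih =>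
    obtain ⟨w, c⟩ := wc
    simp only [List.map_cons, List.nodup_cons] at hnd
    rw [List.foldl_cons]
    by_cases hix : PySem.List.index? lw w = some j
    · -- this pair writes column j; no later pair can (its word would equal lw[j] = w)
      obtain ⟨hjl, hval, _⟩ := PySem.List.getElem_of_index?_eq_some hix
      have hstep : stepB (buildIndex lw) r (w, c) = r.set j c := by
        unfold stepB; rw [buildIndex_get? lw w, hix]; simp
      have hrest : rest.find? (fun wc => PySem.List.index? lw wc.1 == some j) = none := by
        apply List.find?_eq_none.mpr
        intro p hp
        simp only [beq_iff_eq]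
        intro h
        obtain ⟨_, hv, _⟩ := PySem.List.getElem_of_index?_eq_some h
        exact hnd.1 (by
          have : p.1 = w := by rw [← hv, hval]
          exact this ▸ List.mem_map_of_mem hp)
      rw [hstep, ih _ (by simp [hr]) hnd.2 (by simpa using hj)]
      have hix' := hix
      rw [PySem.List.index?_eq_idxOf?] at hix'
      rw [List.find?_cons_of_pos (by simp [hix']), hrest]
      show (r.set j c).getD j 0 = c
      rw [List.getD_eq_getElem _ 0 (by simpa using hj), List.getElem_set_self (by simpa using hj)]
    · have hstep : (stepB (buildIndex lw) r (w, c)).getD j 0 = r.getD j 0 ∧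
          (stepB (buildIndex lw) r (w, c)).length = r.length := by
        unfold stepB
        rw [buildIndex_get? lw w]
        cases hk : PySem.List.index? lw w with
        | none => simp
        | some k =>
          have hkj : k ≠ j := fun h => hix (h ▸ hk)
          simp only [Option.map_some]
          constructor
          · rw [List.getD_eq_getElem _ 0 (by simpa using hj)]
            rw [List.getElem_set_ne (by simpa using hkj), ← List.getD_eq_getElem r 0 hj]
          · simp
      rw [ih _ (hstep.2.trans hr) hnd.2 (hstep.2 ▸ hj)]
      have hix' := hix
      rw [PySem.List.index?_eq_idxOf?] at hix'
      rw [List.find?_cons_of_neg (by simp [hix'])]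
      cases hf : rest.find? (fun wc => PySem.List.index? lw wc.1 == some j) with
      | none => exact hstep.1
      | some p => rfl

-- the counts dict's items: distinct tokens in first-appearance order with their counts
lemma counts_items (ws : List String) :
    (ws.foldl (fun d word => d.insert word (d.getD word 0 + 1))
        (PySem.Dict.empty : PySem.Dict String Int)).items
      = (PySem.Set.ofList ws).map (fun k => (k, (PySem.List.count ws k : Int))) := by
  rw [PySem.Dict.foldl_insert_getD_add_one_eq_counter, PySem.Dict.items_counter]
  simp [PySem.List.count_eq]

-- B's row at column j equals colVal
lemma rowB_getD (lw ws : List String) (j : Nat) (hj : j < lw.length) :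
    (((PySem.Set.ofList ws).map (fun k => (k, (PySem.List.count ws k : Int)))).foldl
        (stepB (buildIndex lw)) (List.replicate lw.length (0 : Int))).getD j 0
      = colVal lw ws j hj := by
  have hnd : (((PySem.Set.ofList ws).map (fun k => (k, (PySem.List.count ws k : Int)))).map (·.1)).Nodup := by
    rw [List.map_map]
    have : ((fun x : String × Int => x.1) ∘ fun k : String => (k, (PySem.List.count ws k : Int))) = id := rfl
    rw [this, List.map_id]
    exact PySem.Set.nodup_ofList ws
  rw [scatter_getD lw _ _ (by simp) hnd j (by simpa using hj)]
  unfold colVal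
  by_cases hfirst : PySem.List.index? lw lw[j] = some j
  · rw [if_pos hfirst]
    by_cases hmem : lw[j] ∈ ws
    · have hmem' : lw[j] ∈ PySem.Set.ofList ws := (PySem.Set.mem_ofList ws _).mpr hmem
      -- find? hits exactly the pair for lw[j]
      cases hf : ((PySem.Set.ofList ws).map (fun k => (k, (PySem.List.count ws k : Int)))).find?
          (fun wc => PySem.List.index? lw wc.1 == some j) with
      | none =>
        exfalso
        have := List.find?_eq_none.mp hf (lw[j], (PySem.List.count ws lw[j] : Int))
          (List.mem_map_of_mem hmem')
        rw [PySem.List.index?_eq_idxOf?] at hfirst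
        simp [hfirst] at this
      | some p =>
        have hpmem := List.find?_some hf
        simp only [beq_iff_eq] at hpmem
        obtain ⟨_, hv, _⟩ := PySem.List.getElem_of_index?_eq_some hpmem
        obtain ⟨k, hk, hkp⟩ := List.mem_map.mp (List.mem_of_find?_eq_some hf)
        have hk1 : p.1 = lw[j] := hv.symm
        have : p.2 = (PySem.List.count ws lw[j] : Int) := by
          rw [← hkp] at hk1 ⊢
          simp at hk1 ⊢
          rw [hk1]
        simp [this]
    · -- lw[j] not a token: find? misses and count is 0
      have hf : ((PySem.Set.ofList ws).map (fun k => (k, (PySem.List.count ws k : Int)))).find?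
          (fun wc => PySem.List.index? lw wc.1 == some j) = none := by
        apply List.find?_eq_none.mpr
        intro p hp
        simp only [beq_iff_eq]
        intro h
        obtain ⟨_, hv, _⟩ := PySem.List.getElem_of_index?_eq_some h
        obtain ⟨k, hk, hkp⟩ := List.mem_map.mp hp
        apply hmem
        have : p.1 = lw[j] := hv.symm
        rw [← hkp] at this; simp at this
        exact this ▸ (PySem.Set.mem_ofList ws k).mp hk
      rw [hf]
      have hz : PySem.List.count ws lw[j] = 0 := by
        rw [PySem.List.count_eq]; exact List.count_eq_zero.mpr hmem
      rw [hz]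
      simp [hj]
  · rw [if_neg hfirst]
    have hf : ((PySem.Set.ofList ws).map (fun k => (k, (PySem.List.count ws k : Int)))).find?
        (fun wc => PySem.List.index? lw wc.1 == some j) = none := by
      apply List.find?_eq_none.mpr
      intro p hp
      simp only [beq_iff_eq]
      intro h
      obtain ⟨_, hv, _⟩ := PySem.List.getElem_of_index?_eq_some h
      exact hfirst (hv ▸ h)
    rw [hf]
    simp [hj]

-- the zero row A starts from
lemma temp0_eq (n : Nat) :
    ((PySem.List.pyRange 0 (n : Int) 1).map (fun _ => (0 : Int))) = List.replicate n 0 := by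
  rw [PySem.List.pyRange_one]
  simp [List.map_map]
  simp [List.eq_replicate_iff]

-- per-line equality of the two rows
lemma row_eq (lw ws : List String) :
    ws.foldl (stepA lw) (List.replicate lw.length (0 : Int))
      = ((PySem.Set.ofList ws).map (fun k => (k, (PySem.List.count ws k : Int)))).foldl
          (stepB (buildIndex lw)) (List.replicate lw.length (0 : Int)) := by
  have hlenB : ∀ (L : List (String × Int)) (r : List Int),
      (L.foldl (stepB (buildIndex lw)) r).length = r.length := by
    intro L
    induction L with
    | nil => intro r; rfl
    | cons p rest ih =>
      intro r
      rw [List.foldl_cons, ih]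
      unfold stepB
      cases (buildIndex lw).get? p.1 <;> simp
  apply List.ext_getElem
  · rw [length_foldA, hlenB]
  · intro j hja hjb
    have hjl : j < lw.length := by rw [length_foldA] at hja; simpa using hja
    rw [← List.getD_eq_getElem _ 0 hja, ← List.getD_eq_getElem _ 0 hjb]
    rw [foldA_getD lw ws _ (by simp) j (by simpa using hjl)]
    rw [rowB_getD lw ws j hjl]
    rw [← cntA_eq_colVal lw ws j hjl]
    simp [hjl]

-- ===== VERDICT (by name: the statement is the Claim_ definition above) =====
theorem vectorizer_spec : Claim_equal_vectorizer := by
  intro dv lw _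
  unfold Spec_vectorizer vectorizer vectorizer_alt
  rw [PySem.List.foldl_append_singleton_eq_map, PySem.List.foldl_append_singleton_eq_map]
  simp only [List.nil_append]
  apply List.map_congr_left
  intro line _
  show ((PySem.Str.split? line " ").getD []).foldl (stepA lw) _
      = (_ : List Int)
  rw [temp0_eq lw.length]
  rw [row_eq lw ((PySem.Str.split? line " ").getD [])]
  rw [counts_items]
  rfl
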